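-- pv_equiv track=rewrite | github.com/ModelOriented/mascots | mascots/explainer/pipeline.py | get_borf_config
-- ===== SOURCE A (Python) =====
-- from typing import Any
--
-- def get_borf_config(data_shape: tuple[int, ...]) -> list[dict[str, Any]]:
--     n_samples, n_feats, n_timestamps = data_shape
--     word_sizes = []
--     for i in range(3, n_timestamps):
--         if 2**i > n_timestamps:
--             break
--         word_sizes.append(2**i)
--
--     config = []
--     for word_size in word_sizes:
--         n_symbols = [4]
--         for i in range(len(n_symbols)):
--             if n_symbols[i] > word_size:
--                 break
--             # stride = word_size // n_symbols[i]
--             config.append(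
--                 {
--                     "window_size": word_size,
--                     "stride": 1,
--                     "dilation": 1,
--                     "word_length": n_symbols[i],
--                     "alphabet_size": 3,
--                 }
--             )
--
--     return config
-- ===== SOURCE B (Python) =====
-- # B: closed-form bound via bit_length instead of A's loop-and-break power search.
-- def get_borf_config(data_shape):
--     n_samples, n_feats, n_timestamps = data_shape
--     hi = n_timestamps.bit_length() - 1 if n_timestamps > 0 else 0
--     return [
--         {
--             "window_size": 2 ** i,
--             "stride": 1,
--             "dilation": 1,
--             "word_length": 4,
--             "alphabet_size": 3,
--         }
--         for i in range(3, hi + 1)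
--     ]
-- ===== Notes on version B (the rewrite author's own statement) =====
-- stated objective: simpler
-- what changed: Replaces A's two nested loops (a break-on-overflow search over range(3, n_timestamps) for powers of two, plus a degenerate inner loop over [4]) with the closed-form exponent bound n_timestamps.bit_length()-1 and a single comprehension.
import Mathlib
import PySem

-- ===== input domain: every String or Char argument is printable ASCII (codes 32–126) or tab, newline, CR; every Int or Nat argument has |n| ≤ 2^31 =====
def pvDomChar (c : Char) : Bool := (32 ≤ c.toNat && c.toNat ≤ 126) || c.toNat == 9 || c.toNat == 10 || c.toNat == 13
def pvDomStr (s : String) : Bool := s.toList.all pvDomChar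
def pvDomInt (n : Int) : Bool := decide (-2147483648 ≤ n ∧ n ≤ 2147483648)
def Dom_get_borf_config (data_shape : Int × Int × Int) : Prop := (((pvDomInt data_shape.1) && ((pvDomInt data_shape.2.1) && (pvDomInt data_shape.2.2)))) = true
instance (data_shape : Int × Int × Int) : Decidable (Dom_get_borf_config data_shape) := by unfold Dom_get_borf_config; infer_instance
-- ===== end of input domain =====

-- B replaces A's loop-and-break search for powers of two by the closed-form
-- exponent bound n.bit_length() - 1 and one comprehension (objective: simpler).

-- ===== PORT A =====
-- 'for i in range(3, n_timestamps): if 2**i > n_timestamps: break; word_sizes.append(2**i)'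
def borfWordSizes (n : Int) : List Int → List Int
  | [] => []
  | i :: rest =>
      if (2 : Int) ^ i.toNat > n then [] else (2 : Int) ^ i.toNat :: borfWordSizes n rest

-- the dict literal appended inside the inner loop
def borfDict (word_size : Int) (s : Int) : List (String × Int) :=
  [("window_size", word_size), ("stride", 1), ("dilation", 1),
   ("word_length", s), ("alphabet_size", 3)]

-- inner 'for i in range(len(n_symbols)): if n_symbols[i] > word_size: break; config.append(…)'
def borfInner (n_symbols : List Int) (word_size : Int)
    (cfg : List (List (String × Int))) : List (List (String × Int)) :=
  match n_symbols with
  | [] => cfg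
  | s :: rest =>
      if s > word_size then cfg else borfInner rest word_size (cfg ++ [borfDict word_size s])

def get_borf_config (data_shape : Int × Int × Int) : List (List (String × Int)) :=
  match data_shape with
  | (_n_samples, _n_feats, n_timestamps) =>
    List.foldl (fun cfg w => borfInner [4] w cfg) []
      (borfWordSizes n_timestamps (PySem.List.pyRange 3 n_timestamps 1))

-- ===== PORT B =====
-- the dict literal of Source B's comprehension, for exponent i
def borfEntry (i : Int) : List (String × Int) :=
  [("window_size", (2 : Int) ^ i.toNat), ("stride", 1), ("dilation", 1),
   ("word_length", 4), ("alphabet_size", 3)]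

def get_borf_config_alt (data_shape : Int × Int × Int) : List (List (String × Int)) :=
  match data_shape with
  | (_n_samples, _n_feats, n_timestamps) =>
    (PySem.List.pyRange 3
      ((if 0 < n_timestamps then (PySem.Int.bitLength n_timestamps : Int) - 1 else 0) + 1) 1).map
      borfEntry

-- ===== PRECONDITION & SPEC =====
def Spec_get_borf_config (data_shape : Int × Int × Int) (out : List (List (String × Int))) : Prop := out = get_borf_config_alt data_shape
instance (data_shape : Int × Int × Int) (out : List (List (String × Int))) : Decidable (Spec_get_borf_config data_shape out) := by unfold Spec_get_borf_config; infer_instance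

-- ===== CLAIM (what is proved, stated in full; the proofs are below) =====
def Claim_equal_get_borf_config : Prop := ∀ (data_shape : Int × Int × Int), Dom_get_borf_config data_shape → Spec_get_borf_config data_shape (get_borf_config data_shape)

-- ===== LEMMAS AND PROOFS =====

lemma pyRange_one_empty {a b : Int} (h : b ≤ a) : PySem.List.pyRange a b 1 = [] := by
  simp [PySem.List.pyRange]
  omega

-- bit_length ≤ k exactly when n < 2^k (for n > 0)
lemma bitLength_le_iff {n : Int} (hn : 0 < n) (k : Nat) :
    PySem.Int.bitLength n ≤ k ↔ n < (2 : Int) ^ k := by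
  constructor
  · intro h
    have h1 := PySem.Int.lt_two_pow_bitLength n
    have h2 : (2 : Nat) ^ PySem.Int.bitLength n ≤ 2 ^ k := Nat.pow_le_pow_right (by omega) h
    have h3 : n.natAbs < 2 ^ k := lt_of_lt_of_le h1 h2
    have h4 : ((n.natAbs : Int)) < ((2 : Nat) ^ k : Int) := by exact_mod_cast h3
    have h5 : ((2 : Nat) ^ k : Int) = (2 : Int) ^ k := by push_cast; ring
    have := Int.natAbs_of_nonneg hn.le
    omega
  · intro h
    by_contra hk
    push Not at hk
    have h2 := PySem.Int.two_pow_bitLength_le n (by omega)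
    have h3 : (2 : Nat) ^ k ≤ 2 ^ (PySem.Int.bitLength n - 1) :=
      Nat.pow_le_pow_right (by omega) (by omega)
    have := Int.natAbs_of_nonneg hn.le
    have hpow : ((2 : Nat) ^ k : Int) = (2 : Int) ^ k := by push_cast; ring
    omega

-- A's break-loop over range(3, n) yields exactly the exponents 3 … bit_length(n)-1
lemma wordSizes_eq (n : Int) (hn : 0 < n) :
    ∀ (k : Nat) (a : Int), 3 ≤ a → (n - a).toNat ≤ k →
    borfWordSizes n (PySem.List.pyRange a n 1)
      = (PySem.List.pyRange a ((PySem.Int.bitLength n : Int) - 1 + 1) 1).map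
          (fun i => (2 : Int) ^ i.toNat) := by
  intro k
  induction k with
  | zero =>
      intro a ha hk
      have hna : n ≤ a := by omega
      rw [pyRange_one_empty hna, pyRange_one_empty]
      · rfl
      · have hbl : PySem.Int.bitLength n ≤ a.toNat := by
          rw [bitLength_le_iff hn]
          calc n ≤ a := hna
            _ < (2 : Int) ^ a.toNat := by
                have : (a.toNat : Int) < ((2 : Nat) ^ a.toNat : Int) := by
                  exact_mod_cast Nat.lt_two_pow_self
                push_cast at this ⊢
                omega
        omega
  | succ k ih =>
      intro a ha hk
      by_cases hab : n ≤ a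
      · rw [pyRange_one_empty hab, pyRange_one_empty]
        · rfl
        · have hbl : PySem.Int.bitLength n ≤ a.toNat := by
            rw [bitLength_le_iff hn]
            calc n ≤ a := hab
              _ < (2 : Int) ^ a.toNat := by
                  have : (a.toNat : Int) < ((2 : Nat) ^ a.toNat : Int) := by
                    exact_mod_cast Nat.lt_two_pow_self
                  push_cast at this ⊢
                  omega
          omega
      · push Not at hab
        rw [PySem.List.pyRange_one_cons hab]
        by_cases hbig : (2 : Int) ^ a.toNat > n
        · have hbl : PySem.Int.bitLength n ≤ a.toNat := (bitLength_le_iff hn _).mpr hbig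
          simp only [borfWordSizes, if_pos hbig]
          rw [pyRange_one_empty (by omega)]
          rfl
        · push Not at hbig
          have hlt : a < (PySem.Int.bitLength n : Int) - 1 + 1 := by
            have hA : ¬ PySem.Int.bitLength n ≤ a.toNat :=
              fun h => absurd ((bitLength_le_iff hn _).mp h) (not_lt.mpr hbig)
            omega
          rw [PySem.List.pyRange_one_cons hlt]
          simp only [borfWordSizes, if_neg (not_lt.mpr hbig), List.map_cons]
          rw [ih (a + 1) (by omega) (by omega)]

-- the inner loop never breaks for a word size ≥ 4 and appends one dict
lemma borfInner_four (w : Int) (cfg : List (List (String × Int))) (hw : 4 ≤ w) :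
    borfInner [4] w cfg = cfg ++ [borfDict w 4] := by
  simp [borfInner, not_lt.mpr hw]

-- every exponent produced by the range is ≥ 3, so its power of two is ≥ 8
lemma mem_map_range_ge (b : Int) (w : Int)
    (hw : w ∈ (PySem.List.pyRange 3 b 1).map (fun i => (2 : Int) ^ i.toNat)) : 4 ≤ w := by
  rcases List.mem_map.mp hw with ⟨i, hi, rfl⟩
  have h3 : 3 ≤ i := (PySem.List.mem_pyRange_one.mp hi).1
  have h8 : (2 : Int) ^ 3 ≤ (2 : Int) ^ i.toNat :=
    pow_le_pow_right₀ (by norm_num) (by omega)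
  norm_num at h8
  omega

-- ===== VERDICT (by name: the statement is the Claim_ definition above) =====
theorem get_borf_config_spec : Claim_equal_get_borf_config := by
  intro ds _
  obtain ⟨s, f, n⟩ := ds
  unfold Spec_get_borf_config get_borf_config get_borf_config_alt
  dsimp only
  by_cases hpos : 0 < n
  · rw [wordSizes_eq n hpos (n - 3).toNat 3 (by omega) (by omega)]
    rw [if_pos hpos]
    rw [PySem.List.foldl_congr_mem _ _ (fun cfg w => cfg ++ [borfDict w 4]) []
        (fun acc x hx => borfInner_four x acc (mem_map_range_ge _ x hx))]
    rw [PySem.List.foldl_append_singleton_eq_map]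
    simp only [List.nil_append, List.map_map]
    exact List.map_congr_left fun i _ => rfl
  · push Not at hpos
    rw [pyRange_one_empty (by omega), if_neg (by omega), pyRange_one_empty (by norm_num)]
    rfl
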